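-- pv_equiv track=rewrite | github.com/jy3202/CS-1110 | Assignment 6 - Clustering/a6algorithm.py | valid_seeds
-- ===== SOURCE A (Python) =====
-- def valid_seeds(value, size):
--     """
--     Returns True if value is a valid list of seeds for clustering.
--
--     A list of seeds is a k-element list OR tuple of integersa between 0 and size-1.
--     In addition, no seed element can appear twice.
--
--     Parameter valud: a value to check
--     Precondition: value can be anything
--
--     Paramater size: The database size
--     Precondition: size is an int > 0
--     """
--     # IMPLEMENT ME
--     #enforce precondition
--     assert type(size)==int and size>0
--
--     #check for valid list of seeds and return Boolean accordingly
--     good = True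
--     if type(value) == list or type(value) == tuple:
--         for k in value:
--             if type(k)==int and k>=0 and k<=size-1 and not value.count(k)>1:
--                 good = True
--             else:
--                 return False
--     else:
--         return False
--     return good
-- ===== SOURCE B (Python) =====
-- def valid_seeds(value, size):
--     """
--     Returns True if value is a valid list of seeds for clustering.
--
--     A list of seeds is a k-element list OR tuple of integers between 0 and size-1.
--     In addition, no seed element can appear twice.
--     """
--     assert type(size) == int and size > 0
--     if type(value) not in (list, tuple):
--         return False
--     if not all(type(k) == int for k in value):
--         return False
--     # sort a copy: range check collapses to the two extremes, duplicates
--     # become adjacent, so one scan of neighbouring pairs decides uniqueness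
--     s = sorted(value)
--     if s and (s[0] < 0 or s[-1] > size - 1):
--         return False
--     return all(a != b for a, b in zip(s, s[1:]))
-- ===== Notes on version B (the rewrite author's own statement) =====
-- stated objective: alternative
-- what changed: Instead of A's single loop that rescans the whole list with value.count(k) and range-tests every element, B sorts a copy once, checks the range on the two extremes s[0] and s[-1] only, and decides uniqueness by one scan of adjacent pairs of the sorted list.
import Mathlib
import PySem

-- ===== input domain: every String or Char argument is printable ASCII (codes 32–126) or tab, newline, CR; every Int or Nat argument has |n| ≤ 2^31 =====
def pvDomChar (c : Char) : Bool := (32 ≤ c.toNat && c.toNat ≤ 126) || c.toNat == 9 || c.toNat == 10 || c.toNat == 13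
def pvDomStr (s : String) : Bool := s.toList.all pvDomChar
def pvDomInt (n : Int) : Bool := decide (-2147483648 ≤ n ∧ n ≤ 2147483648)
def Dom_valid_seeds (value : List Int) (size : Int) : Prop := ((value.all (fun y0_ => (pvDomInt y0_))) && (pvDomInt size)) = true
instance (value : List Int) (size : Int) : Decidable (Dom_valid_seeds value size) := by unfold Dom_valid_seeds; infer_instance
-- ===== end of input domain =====

-- B sorts a copy of value: the per-element range test collapses to checking the two
-- extremes s[0] and s[-1], and uniqueness to one scan of adjacent pairs (objective:
-- alternative algorithm; A instead rescans value with value.count for every element).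
-- Under the List Int convention value is always a list of ints, so A's
-- type(value)/type(k) branches always take the list/int path.

-- ===== PORT A =====
-- the 'for k in value' loop; value is carried whole because value.count(k) scans the full list
def valid_seeds_go (value : List Int) (size : Int) : List Int → Bool
  | [] => true
  | k :: rest =>
      if decide (0 ≤ k) && decide (k ≤ size - 1) && !(decide (value.count k > 1)) then
        valid_seeds_go value size rest
      else
        false

def valid_seeds (value : List Int) (size : Int) : Bool :=
  valid_seeds_go value size value

-- ===== PORT B =====
-- s = sorted(value); 'if s and (s[0] < 0 or s[-1] > size-1)'; then adjacent-pair scan over zip(s, s[1:])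
def valid_seeds_alt (value : List Int) (size : Int) : Bool :=
  let s := PySem.List.sorted value (fun x => x)
  if (!s.isEmpty) && (decide (s.head! < 0) || decide (s.getLast! > size - 1)) then
    false
  else
    (s.zip s.tail).all (fun p => decide (p.1 ≠ p.2))

-- ===== PRECONDITION & SPEC =====
-- A (and B) assert size > 0 and raise AssertionError otherwise; Pre_ excludes exactly that.
def Pre_valid_seeds (value : List Int) (size : Int) : Prop := 0 < size
instance (value : List Int) (size : Int) : Decidable (Pre_valid_seeds value size) := by unfold Pre_valid_seeds; infer_instance
def pvWitness_valid_seeds : List Int × Int := ([0, 2, 1], 3)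

def Spec_valid_seeds (value : List Int) (size : Int) (out : Bool) : Prop := out = valid_seeds_alt value size
instance (value : List Int) (size : Int) (out : Bool) : Decidable (Spec_valid_seeds value size out) := by unfold Spec_valid_seeds; infer_instance

-- ===== CLAIM (what is proved, stated in full; the proofs are below) =====
def Claim_equal_valid_seeds : Prop := ∀ (value : List Int) (size : Int), Dom_valid_seeds value size → Pre_valid_seeds value size → Spec_valid_seeds value size (valid_seeds value size)

-- ===== LEMMAS AND PROOFS =====

-- A's loop is an 'all' over the remaining suffix
theorem valid_seeds_go_eq_all (value : List Int) (size : Int) (rest : List Int) :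
    valid_seeds_go value size rest
      = rest.all (fun k => decide (0 ≤ k) && decide (k ≤ size - 1) && !(decide (value.count k > 1))) := by
  induction rest with
  | nil => rfl
  | cons k rest ih =>
      by_cases h : (decide (0 ≤ k) && decide (k ≤ size - 1) && !(decide (value.count k > 1))) = true
      · simp only [valid_seeds_go]
        rw [if_pos h, ih, List.all_cons, h, Bool.true_and]
      · simp only [valid_seeds_go]
        rw [if_neg h, List.all_cons, Bool.eq_false_iff.mpr h, Bool.false_and]

theorem count_le_one_iff_nodup (l : List Int) :
    (∀ k ∈ l, l.count k ≤ 1) ↔ l.Nodup := by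
  rw [List.nodup_iff_count_le_one]
  constructor
  · intro h a
    by_cases ha : a ∈ l
    · exact h a ha
    · simp [List.count_eq_zero_of_not_mem ha]
  · intro h k _
    exact h k

-- A in canonical form: all elements in [0, size-1] and no duplicates
theorem valid_seeds_iff (value : List Int) (size : Int) :
    valid_seeds value size = true ↔
      (∀ k ∈ value, 0 ≤ k ∧ k ≤ size - 1) ∧ value.Nodup := by
  unfold valid_seeds
  rw [valid_seeds_go_eq_all]
  simp only [List.all_eq_true, Bool.and_eq_true, Bool.not_eq_true', decide_eq_true_eq,
    decide_eq_false_iff_not, not_lt]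
  constructor
  · intro h
    exact ⟨fun k hk => (h k hk).1, (count_le_one_iff_nodup value).mp fun k hk => (h k hk).2⟩
  · intro ⟨h1, h2⟩ k hk
    exact ⟨h1 k hk, (count_le_one_iff_nodup value).mpr h2 k hk⟩

-- the adjacent-pair scan is IsChain (· ≠ ·)
theorem zip_tail_all_ne_iff (s : List Int) :
    (s.zip s.tail).all (fun p => decide (p.1 ≠ p.2)) = true ↔ s.IsChain (· ≠ ·) := by
  induction s with
  | nil => simp
  | cons a t ih =>
      cases t with
      | nil => simp
      | cons b t' =>
          simp only [List.tail_cons, List.zip_cons_cons, List.all_cons, Bool.and_eq_true,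
            decide_eq_true_eq, List.isChain_cons_cons]
          rw [← ih]
          simp [List.tail_cons]

theorem head_le_of_pairwise (l : List Int) (hpw : l.Pairwise (· ≤ ·)) :
    ∀ k ∈ l, l.head! ≤ k := by
  intro k hk
  cases l with
  | nil => simp at hk
  | cons a t =>
      simp only [List.head!_cons]
      rcases List.mem_cons.mp hk with rfl | hkt
      · exact le_refl _
      · exact (List.pairwise_cons.mp hpw).1 k hkt

theorem getLast_bang_eq (l : List Int) (h : l ≠ []) : l.getLast! = l.getLast h := by
  rw [List.getLast!_eq_getLast?_getD, List.getLast?_eq_some_getLast h]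
  rfl

theorem le_getLast_of_pairwise (l : List Int) (hpw : l.Pairwise (· ≤ ·)) (hne : l ≠ []) :
    ∀ k ∈ l, k ≤ l.getLast! := by
  intro k hk
  obtain ⟨i, hi, rfl⟩ := List.getElem_of_mem hk
  rw [getLast_bang_eq _ hne, List.getLast_eq_getElem]
  rcases Nat.lt_or_ge i (l.length - 1) with h | h
  · exact List.pairwise_iff_getElem.mp hpw i (l.length - 1) hi (by omega) h
  · have hieq : i = l.length - 1 := by omega
    exact le_of_eq (by simp [hieq])

-- on a ≤-sorted list, adjacent pairs all distinct ↔ no duplicates anywhere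
theorem isChain_ne_iff_nodup (s : List Int) (hpw : s.Pairwise (· ≤ ·)) :
    s.IsChain (· ≠ ·) ↔ s.Nodup := by
  constructor
  · intro h
    have hle : s.IsChain (· ≤ ·) := List.isChain_iff_pairwise.mpr hpw
    have hlt : s.IsChain (· < ·) := by
      rw [List.isChain_iff_getElem] at *
      intro i hi
      exact lt_of_le_of_ne (hle i hi) (h i hi)
    exact (List.isChain_iff_pairwise.mp hlt).imp ne_of_lt
  · intro h
    exact h.isChain

-- ===== VERDICT (by name: the statement is the Claim_ definition above) =====
theorem valid_seeds_spec : Claim_equal_valid_seeds := by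
  intro value size _ _
  unfold Spec_valid_seeds valid_seeds_alt
  set s := PySem.List.sorted value (fun x => x) with hs
  have hperm : s.Perm value := PySem.List.sorted_perm value (fun x => x) false
  have hpw : s.Pairwise (· ≤ ·) := PySem.List.sorted_pairwise value (fun x => x)
  have hnd : s.Nodup ↔ value.Nodup := hperm.nodup_iff
  by_cases hnil : s = []
  · have hv : value = [] := List.perm_nil.mp (hnil ▸ hperm).symm
    subst hv
    simp [valid_seeds, valid_seeds_go, hnil]
  · have hrange : (0 ≤ s.head! ∧ s.getLast! ≤ size - 1) ↔ (∀ k ∈ value, 0 ≤ k ∧ k ≤ size - 1) := by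
      constructor
      · intro ⟨h0, h1⟩ k hk
        have hk' : k ∈ s := hperm.mem_iff.mpr hk
        exact ⟨le_trans h0 (head_le_of_pairwise s hpw k hk'),
               le_trans (le_getLast_of_pairwise s hpw hnil k hk') h1⟩
      · intro h
        have hh : s.head! ∈ value := hperm.mem_iff.mp (List.head!_mem_self hnil)
        have hl : s.getLast! ∈ value := by
          apply hperm.mem_iff.mp
          rw [getLast_bang_eq _ hnil]
          exact List.getLast_mem _
        exact ⟨(h _ hh).1, (h _ hl).2⟩
    have hie : s.isEmpty = false := by
      cases hs' : s with
      | nil => exact absurd hs' hnil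
      | cons a t => rfl
    by_cases hr : 0 ≤ s.head! ∧ s.getLast! ≤ size - 1
    · rw [if_neg (by
        simp only [hie, Bool.not_false, Bool.true_and, Bool.or_eq_true, decide_eq_true_eq]
        omega)]
      by_cases hn : value.Nodup
      · have hA : valid_seeds value size = true :=
          (valid_seeds_iff value size).mpr ⟨hrange.mp hr, hn⟩
        have hB : (s.zip s.tail).all (fun p => decide (p.1 ≠ p.2)) = true :=
          (zip_tail_all_ne_iff s).mpr ((isChain_ne_iff_nodup s hpw).mpr (hnd.mpr hn))
        rw [hA, hB]
      · have hA : valid_seeds value size = false := by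
          rw [Bool.eq_false_iff]
          intro hh
          exact hn ((valid_seeds_iff value size).mp hh).2
        have hB : (s.zip s.tail).all (fun p => decide (p.1 ≠ p.2)) = false := by
          rw [Bool.eq_false_iff]
          intro hh
          exact hn (hnd.mp ((isChain_ne_iff_nodup s hpw).mp ((zip_tail_all_ne_iff s).mp hh)))
        rw [hA, hB]
    · rw [if_pos (by
        simp only [hie, Bool.not_false, Bool.true_and, Bool.or_eq_true, decide_eq_true_eq]
        omega)]
      rw [Bool.eq_false_iff]
      intro hh
      exact hr (hrange.mpr ((valid_seeds_iff value size).mp hh).1)
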